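-- pv_equiv track=rewrite | github.com/swinman/avr32 | makeuser.py | _makeCFGWord
-- ===== SOURCE A (Python) =====
-- def _makeCFGWord(pin=5, pinhigh=False):
--     """ make the cfg word, including a checksum based on a certain pin number and
--     pin condition
--     returns the word as a list with 4 byte values
--     """
--     magic = 0x494F
--     pval = 1 if pinhigh else 0
--     word3 = ((magic<<17) + (pval<<16) + (pin<<8))>>8
--     print ("First 3 bytes: 0x{0:0>6X}".format(word3))
--     crc8 = _getCRC8(word3)
--     print ("Checksum (CRC8): 0x{0:0>2X}".format(crc8))
--     word = (word3<<8) + crc8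
--     whex = "{0:0>8X}".format(word)
--     print ("Word is: 0x{0}".format(whex))
--     wvals = [int(whex[2 * i : 2 * i + 2], 16) for i in range(4)]
--     return wvals
--
-- def _getCRC8(word3):
--     """
--     calculate one byte cyclic redundancy check
--
--     C(x) = x^8 + x^2 + x^1 + x^0 == 1 0 0 0 0 0 1 1 1
--
--     from: http://ghsi.de/CRC/index.php?Polynom=100000111&Message=929E05
--     // ========================================================================
--     // CRC Generation Unit - Linear Feedback Shift Register implementation
--     // (c) Kay Gorontzi, GHSi.de, distributed under the terms of LGPL
--     // ========================================================================
--     """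
--     crc = [0, 0, 0, 0, 0, 0, 0, 0]
--     binstr = [int(b) for b in list("{0:b}".format(word3))]
--     for v in binstr:
--         doinvert = v ^ crc[7]
--         crc[7] = crc[6]
--         crc[6] = crc[5]
--         crc[5] = crc[4]
--         crc[4] = crc[3]
--         crc[3] = crc[2]
--         crc[2] = crc[1] ^ doinvert
--         crc[1] = crc[0] ^ doinvert
--         crc[0] = doinvert
--     return sum([c*2**i for i, c in enumerate(crc)])
-- ===== SOURCE B (Python) =====
-- # Table-driven byte-wise CRC8 (polynomial x^8 + x^2 + x + 1) instead of a bit-serial LFSR loop.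
--
-- def _crc8_table():
--     """256-entry CRC8 table for polynomial 0b111, MSB-first."""
--     tbl = []
--     for byte in range(256):
--         crc = 0
--         for k in range(8):
--             bit = (byte >> (7 - k)) & 1
--             feedback = bit ^ (crc >> 7)
--             crc = ((crc << 1) & 0xFF) ^ (0b111 if feedback else 0)
--         tbl.append(crc)
--     return tbl
--
-- _CRC8_TABLE = _crc8_table()
--
-- def _crc8(data):
--     crc = 0
--     for b in data:
--         crc = _CRC8_TABLE[crc ^ b]
--     return crc
--
-- def _makeCFGWord(pin=5, pinhigh=False):
--     """ make the cfg word, including a checksum based on a certain pin number and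
--     pin condition
--     returns the word as a list with 4 byte values
--     """
--     magic = 0x494F
--     pval = 1 if pinhigh else 0
--     word3 = (magic << 9) + (pval << 8) + pin
--     print ("First 3 bytes: 0x{0:0>6X}".format(word3))
--     nbytes = (word3.bit_length() + 7) // 8 or 1
--     crc8 = _crc8(word3.to_bytes(nbytes, 'big'))
--     print ("Checksum (CRC8): 0x{0:0>2X}".format(crc8))
--     word = (word3 << 8) + crc8
--     whex = "{0:0>8X}".format(word)
--     print ("Word is: 0x{0}".format(whex))
--     wvals = [int(whex[2 * i : 2 * i + 2], 16) for i in range(4)]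
--     return wvals
-- ===== Notes on version B (the rewrite author's own statement) =====
-- stated objective: idiomatic
-- what changed: The checksum is computed byte-wise over word3's big-endian bytes through a precomputed 256-entry CRC8 table (crc = table[crc ^ byte]) instead of A's bit-serial 8-element-list LFSR over the digits of a binary string, and word3 is built by one direct shift-add instead of shifting up by 8 and back down; Pre_ excludes only inputs where word3 < 0, on which A raises ValueError.
import Mathlib
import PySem

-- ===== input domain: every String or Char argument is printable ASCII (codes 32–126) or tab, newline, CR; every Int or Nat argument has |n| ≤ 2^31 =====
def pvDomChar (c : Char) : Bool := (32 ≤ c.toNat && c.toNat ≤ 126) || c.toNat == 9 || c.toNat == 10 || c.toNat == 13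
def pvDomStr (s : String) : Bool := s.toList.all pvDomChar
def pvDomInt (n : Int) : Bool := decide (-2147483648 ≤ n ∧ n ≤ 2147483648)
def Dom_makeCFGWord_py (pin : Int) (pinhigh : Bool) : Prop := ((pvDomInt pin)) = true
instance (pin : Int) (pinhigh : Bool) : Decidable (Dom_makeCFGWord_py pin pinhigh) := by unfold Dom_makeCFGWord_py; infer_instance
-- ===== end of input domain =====

-- B computes the checksum byte-wise via a precomputed 256-entry CRC8 table instead of A's
-- bit-serial 8-register LFSR over a binary string (objective: idiomatic). A's print calls are
-- side effects not modeled here; equivalence is about the return value.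

-- ===== shared helpers (hex formatting used verbatim by both Pythons) =====

-- base-b big-endian digits, structural on a fuel argument (fuel ≥ n suffices) so the kernel
-- can reduce it; pvDigits b n are the digits of n in base b, MSB first ([0] for n = 0)
def pvDigitsGo (b : Nat) : Nat → Nat → List Nat
  | 0, n => [n]
  | f + 1, n => if n < b then [n] else pvDigitsGo b f (n / b) ++ [n % b]

def pvDigits (b n : Nat) : List Nat := pvDigitsGo b n n

-- big-endian hex digits of a Nat, as "{0:X}" produces them
def pvHexDigitsA (n : Nat) : List Nat := pvDigits 16 n

def pvHexChar (d : Nat) : Char := if d < 10 then Char.ofNat (48 + d) else Char.ofNat (55 + d)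

-- "{0:0>8X}".format(w): exact for 0 ≤ w (guaranteed under Pre_; a negative w would print a '-'
-- and then both Pythons have raised already, outside Pre_)
def pvFormatHex8 (w : Int) : List Char :=
  let s := (pvHexDigitsA w.toNat).map pvHexChar
  List.replicate (8 - s.length) '0' ++ s

-- ===== PORT A =====

-- the LFSR register crc = [c0,...,c7]; one loop body of A's `for v in binstr`
structure Crc8 where
  c0 : Int
  c1 : Int
  c2 : Int
  c3 : Int
  c4 : Int
  c5 : Int
  c6 : Int
  c7 : Int
deriving DecidableEq, Repr

def pvStepA (r : Crc8) (v : Int) : Crc8 :=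
  let d := PySem.Int.bxor v r.c7
  { c7 := r.c6, c6 := r.c5, c5 := r.c4, c4 := r.c3, c3 := r.c2,
    c2 := PySem.Int.bxor r.c1 d, c1 := PySem.Int.bxor r.c0 d, c0 := d }

-- sum([c*2**i for i, c in enumerate(crc)])
def pvSumCrc (r : Crc8) : Int :=
  ((PySem.List.enumerate [r.c0, r.c1, r.c2, r.c3, r.c4, r.c5, r.c6, r.c7]).map
    (fun p => p.2 * 2 ^ p.1.toNat)).sum

-- _getCRC8; int(b) ported as (ofChars? [b]).getD 0: exact on the '0'/'1' digit chars produced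
-- for word3 ≥ 0 (Pre_); for word3 < 0 the '-' char makes Python's int(b) raise (outside Pre_)
def pvGetCRC8 (word3 : Int) : Int :=
  let binstr : List Int := (PySem.Int.toBinChars word3).map (fun b => (PySem.Int.ofChars? [b]).getD 0)
  pvSumCrc (binstr.foldl pvStepA ⟨0, 0, 0, 0, 0, 0, 0, 0⟩)

def makeCFGWord_py (pin : Int) (pinhigh : Bool) : List Int :=
  let magic : Int := 0x494F
  let pval : Int := if pinhigh then 1 else 0
  let word3 : Int := (magic <<< (17:Nat) + pval <<< (16:Nat) + pin <<< (8:Nat)) >>> (8:Nat)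
  let crc8 : Int := pvGetCRC8 word3
  let word : Int := word3 <<< (8:Nat) + crc8
  let whex : List Char := pvFormatHex8 word
  (PySem.List.pyRange 0 4 1).map (fun i =>
    (PySem.Int.ofCharsBase? (PySem.List.slice whex (some (2 * i)) (some (2 * i + 2))) 16).getD 0)

-- ===== PORT B =====

-- one bit step of the table builder (crc packed as an int)
def pvStepB (crc : Nat) (bit : Nat) : Nat :=
  let d := bit ^^^ (crc >>> 7)
  ((crc <<< 1) &&& 0xFF) ^^^ (if d ≠ 0 then 7 else 0)

def pvCrcByte (byte : Nat) : Nat :=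
  (List.range 8).foldl (fun crc k => pvStepB crc ((byte >>> (7 - k)) &&& 1)) 0

def pvCrcTable : List Nat := (List.range 256).map pvCrcByte

-- word3.to_bytes((word3.bit_length() + 7) // 8 or 1, 'big'): minimal-length big-endian bytes
-- (exact for word3 ≥ 0, i.e. under Pre_; Python's to_bytes raises on a negative word3)
def pvBytesBE (n : Nat) : List Nat := pvDigits 256 n

-- _crc8(data): fold the table through the bytes
def pvCrc8B (data : List Nat) : Nat :=
  data.foldl (fun c b => pvCrcTable.getD (c ^^^ b) 0) 0

def makeCFGWord_py_alt (pin : Int) (pinhigh : Bool) : List Int :=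
  let magic : Int := 0x494F
  let pval : Int := if pinhigh then 1 else 0
  let word3 : Int := magic <<< (9:Nat) + pval <<< (8:Nat) + pin
  let crc8 : Int := (pvCrc8B (pvBytesBE word3.toNat) : Nat)
  let word : Int := word3 <<< (8:Nat) + crc8
  let whex : List Char := pvFormatHex8 word
  (PySem.List.pyRange 0 4 1).map (fun i =>
    (PySem.Int.ofCharsBase? (PySem.List.slice whex (some (2 * i)) (some (2 * i + 2))) 16).getD 0)

-- ===== PRECONDITION & SPEC =====

-- Pre_ holds exactly when word3 ≥ 0, i.e. on every input where A returns: for word3 < 0 the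
-- binary string starts with '-' and A's int(b) raises ValueError (B's to_bytes raises too).
def Pre_makeCFGWord_py (pin : Int) (pinhigh : Bool) : Prop :=
  0 ≤ 0x494F * 512 + (if pinhigh then (256 : Int) else 0) + pin
instance (pin : Int) (pinhigh : Bool) : Decidable (Pre_makeCFGWord_py pin pinhigh) := by
  unfold Pre_makeCFGWord_py; infer_instance

def pvWitness_makeCFGWord_py : Int × Bool := (5, false)

def Spec_makeCFGWord_py (pin : Int) (pinhigh : Bool) (out : List Int) : Prop :=
  out = makeCFGWord_py_alt pin pinhigh
instance (pin : Int) (pinhigh : Bool) (out : List Int) : Decidable (Spec_makeCFGWord_py pin pinhigh out) := by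
  unfold Spec_makeCFGWord_py; infer_instance

-- ===== CLAIM (what is proved, stated in full; the proofs are below) =====
def Claim_equal_makeCFGWord_py : Prop := ∀ (pin : Int) (pinhigh : Bool),
  Dom_makeCFGWord_py pin pinhigh → Pre_makeCFGWord_py pin pinhigh →
  Spec_makeCFGWord_py pin pinhigh (makeCFGWord_py pin pinhigh)

-- ===== LEMMAS AND PROOFS =====

-- binary digits of a Nat, MSB first ("{0:b}")
def pvBinDigits (n : Nat) : List Nat := pvDigits 2 n

theorem pvDigitsGo_fuel (b : Nat) (hb : 2 ≤ b) :
    ∀ f1 f2 n : Nat, n ≤ f1 → n ≤ f2 → pvDigitsGo b f1 n = pvDigitsGo b f2 n := by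
  intro f1
  induction f1 with
  | zero =>
      intro f2 n h1 _
      have : n = 0 := by omega
      subst this
      cases f2 with
      | zero => rfl
      | succ f2 =>
          simp only [pvDigitsGo]
          rw [if_pos (show (0:Nat) < b by omega)]
  | succ f1 ih =>
      intro f2 n h1 h2
      cases f2 with
      | zero =>
          have : n = 0 := by omega
          subst this
          simp only [pvDigitsGo]
          rw [if_pos (show (0:Nat) < b by omega)]
      | succ f2 =>
          simp only [pvDigitsGo]
          by_cases hn : n < b
          · simp [hn]
          · have hd : n / b < n := Nat.div_lt_self (by omega) (by omega)
            simp only [hn, if_false]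
            rw [ih f2 (n / b) (by omega) (by omega)]

theorem pvDigits_small (b n : Nat) (h : n < b) : pvDigits b n = [n] := by
  unfold pvDigits
  cases n with
  | zero => rfl
  | succ m => simp [pvDigitsGo, h]

theorem pvDigits_step (b n : Nat) (hb : 2 ≤ b) (h : b ≤ n) :
    pvDigits b n = pvDigits b (n / b) ++ [n % b] := by
  unfold pvDigits
  obtain ⟨m, rfl⟩ : ∃ m, n = m + 1 := ⟨n - 1, by omega⟩
  simp only [pvDigitsGo, Nat.not_lt.2 h, if_false]
  congr 1
  exact pvDigitsGo_fuel b hb m ((m + 1) / b) ((m + 1) / b)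
    (by have := Nat.div_lt_self (show 0 < m + 1 by omega) (show 1 < b by omega); omega) le_rfl

theorem pv_digits_lt (b : Nat) (hb : 2 ≤ b) : ∀ n, ∀ d ∈ pvDigits b n, d < b := by
  intro n
  induction n using Nat.strong_induction_on with
  | _ n ih =>
      by_cases h : n < b
      · rw [pvDigits_small b n h]; intro d hd; simp at hd; omega
      · rw [pvDigits_step b n hb (by omega)]
        intro d hd
        rcases List.mem_append.1 hd with hd | hd
        · exact ih (n / b) (Nat.div_lt_self (by omega) (by omega)) d hd
        · simp at hd; subst hd; exact Nat.mod_lt _ (by omega)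

-- MSB-first bits of one byte, as the table builder reads them
def pvBits8 (b : Nat) : List Nat := (List.range 8).map (fun k => (b >>> (7 - k)) &&& 1)

-- register unpacking for the A↔B bridge
def pvUnpack (s : Nat) : Crc8 :=
  ⟨((s >>> 0) &&& 1 : Nat), ((s >>> 1) &&& 1 : Nat), ((s >>> 2) &&& 1 : Nat),
   ((s >>> 3) &&& 1 : Nat), ((s >>> 4) &&& 1 : Nat), ((s >>> 5) &&& 1 : Nat),
   ((s >>> 6) &&& 1 : Nat), ((s >>> 7) &&& 1 : Nat)⟩

theorem pv_toDigitsCore_two (f : Nat) :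
    ∀ n acc, n < f → Nat.toDigitsCore 2 f n acc = (pvBinDigits n).map Nat.digitChar ++ acc := by
  induction f with
  | zero => intro n acc h; omega
  | succ f ih =>
      intro n acc h
      simp only [Nat.toDigitsCore]
      by_cases hn : n < 2
      · rw [if_pos (by omega : n / 2 = 0)]
        rw [show pvBinDigits n = [n] from pvDigits_small 2 n hn]
        rw [show n % 2 = n by omega]
        simp
      · rw [if_neg (by omega : ¬ n / 2 = 0)]
        rw [ih (n / 2) _ (by omega)]
        rw [show pvBinDigits n = pvBinDigits (n / 2) ++ [n % 2] from
          pvDigits_step 2 n (by norm_num) (by omega)]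
        simp

theorem pv_toDigits_two (n : Nat) :
    Nat.toDigits 2 n = (pvBinDigits n).map Nat.digitChar := by
  unfold Nat.toDigits
  rw [pv_toDigitsCore_two (n + 1) n [] (by omega)]
  simp

theorem pv_binDigits_lt_two (n : Nat) : ∀ d ∈ pvBinDigits n, d < 2 :=
  pv_digits_lt 2 (by norm_num) n

theorem pv_binstr_eq (n : Nat) :
    ((PySem.Int.toBinChars (n : Int)).map (fun b => (PySem.Int.ofChars? [b]).getD 0))
      = (pvBinDigits n).map Int.ofNat := by
  have h1 : PySem.Int.toBinChars (n : Int) = Nat.toDigits 2 n := by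
    simp [PySem.Int.toBinChars]
  rw [h1, pv_toDigits_two, List.map_map]
  apply List.map_congr_left
  intro d hd
  have hlt := pv_binDigits_lt_two n d hd
  have H : ∀ d < 2, (PySem.Int.ofChars? [Nat.digitChar d]).getD 0 = Int.ofNat d := by decide
  exact H d hlt

theorem pv_stepB_lt (s v : Nat) (hs : s < 256) : pvStepB s v < 256 := by
  have h1 : (s <<< 1) &&& 255 < 256 := by
    have := Nat.and_le_right (n := s <<< 1) (m := 255)
    omega
  have h2 : (if v ^^^ (s >>> 7) ≠ 0 then 7 else 0) < 256 := by split <;> norm_num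
  exact Nat.xor_lt_two_pow (n := 8) h1 h2

theorem pv_bridge (s v : Nat) (hs : s < 256) (hv : v < 2) :
    pvStepA (pvUnpack s) (Int.ofNat v) = pvUnpack (pvStepB s v) := by
  have H : ∀ s : Nat, s < 256 → ∀ v : Nat, v < 2 →
      pvStepA (pvUnpack s) (Int.ofNat v) = pvUnpack (pvStepB s v) := by
    set_option maxRecDepth 4096 in decide
  exact H s hs v hv

theorem pv_sum_unpack (s : Nat) (hs : s < 256) : pvSumCrc (pvUnpack s) = (s : Int) := by
  have H : ∀ s < 256, pvSumCrc (pvUnpack s) = (s : Int) := by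
    set_option maxRecDepth 4096 in decide
  exact H s hs

theorem pv_foldA_eq (l : List Nat) (hl : ∀ d ∈ l, d < 2) :
    ∀ s : Nat, s < 256 →
    (l.map Int.ofNat).foldl pvStepA (pvUnpack s) = pvUnpack (l.foldl pvStepB s) := by
  induction l with
  | nil => intro s _; rfl
  | cons x xs ih =>
      intro s hs
      simp only [List.map_cons, List.foldl_cons]
      rw [pv_bridge s x hs (hl x (by simp))]
      exact ih (fun d hd => hl d (by simp [hd])) (pvStepB s x) (pv_stepB_lt s x hs)

theorem pv_foldB_lt (l : List Nat) : ∀ s : Nat, s < 256 → l.foldl pvStepB s < 256 := by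
  induction l with
  | nil => intro s hs; simpa using hs
  | cons x xs ih => intro s hs; exact ih (pvStepB s x) (pv_stepB_lt s x hs)

theorem pv_table_getD (x : Nat) (hx : x < 256) : pvCrcTable.getD x 0 = pvCrcByte x := by
  have hlen : x < pvCrcTable.length := by simp [pvCrcTable]; omega
  rw [List.getD_eq_getElem _ _ hlen]
  simp [pvCrcTable]

theorem pv_stepB_lin (c1 c2 v1 v2 : Nat) (h1 : c1 < 256) (h2 : c2 < 256)
    (hv1 : v1 < 2) (hv2 : v2 < 2) :
    pvStepB (c1 ^^^ c2) (v1 ^^^ v2) = pvStepB c1 v1 ^^^ pvStepB c2 v2 := by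
  have hr7 : ∀ c : Nat, c < 256 → c >>> 7 < 2 := by
    intro c hc; rw [Nat.shiftRight_eq_div_pow]; omega
  have e1 : c1 >>> 7 < 2 := hr7 c1 h1
  have e2 : c2 >>> 7 < 2 := hr7 c2 h2
  unfold pvStepB
  simp only []
  have hshift : (c1 ^^^ c2) <<< 1 &&& 255 = ((c1 <<< 1) &&& 255) ^^^ ((c2 <<< 1) &&& 255) := by
    rw [Nat.shiftLeft_xor_distrib, Nat.and_xor_distrib_right]
  have hsr : (c1 ^^^ c2) >>> 7 = (c1 >>> 7) ^^^ (c2 >>> 7) := Nat.shiftRight_xor_distrib ..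
  rw [hshift, hsr]
  have hxr : (v1 ^^^ v2) ^^^ ((c1 >>> 7) ^^^ (c2 >>> 7))
      = (v1 ^^^ (c1 >>> 7)) ^^^ (v2 ^^^ (c2 >>> 7)) := by
    simp [Nat.xor_assoc, Nat.xor_comm, Nat.xor_left_comm]
  rw [hxr]
  rcases (show v1 ^^^ (c1 >>> 7) = 0 ∨ v1 ^^^ (c1 >>> 7) = 1 by
      have := Nat.xor_lt_two_pow (n := 1) hv1 e1; omega) with hd1 | hd1 <;>
    rcases (show v2 ^^^ (c2 >>> 7) = 0 ∨ v2 ^^^ (c2 >>> 7) = 1 by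
      have := Nat.xor_lt_two_pow (n := 1) hv2 e2; omega) with hd2 | hd2 <;>
    rw [hd1, hd2] <;>
    simp [Nat.xor_assoc, Nat.xor_comm, Nat.xor_left_comm, Nat.xor_self]

theorem pv_bits8_xor (x y : Nat) :
    pvBits8 (x ^^^ y) = List.zipWith (· ^^^ ·) (pvBits8 x) (pvBits8 y) := by
  unfold pvBits8
  rw [List.zipWith_map_left, List.zipWith_map_right, List.zipWith_self]
  apply List.map_congr_left
  intro k _
  rw [Nat.shiftRight_xor_distrib, Nat.and_xor_distrib_right]

theorem pv_fold_lin : ∀ l1 l2 : List Nat, l1.length = l2.length →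
    (∀ d ∈ l1, d < 2) → (∀ d ∈ l2, d < 2) →
    ∀ c1 c2 : Nat, c1 < 256 → c2 < 256 →
    (List.zipWith (· ^^^ ·) l1 l2).foldl pvStepB (c1 ^^^ c2)
      = l1.foldl pvStepB c1 ^^^ l2.foldl pvStepB c2 := by
  intro l1
  induction l1 with
  | nil =>
      intro l2 hlen _ _ c1 c2 _ _
      cases l2 with
      | nil => rfl
      | cons y ys => simp at hlen
  | cons x xs ih =>
      intro l2 hlen hb1 hb2 c1 c2 hc1 hc2
      cases l2 with
      | nil => simp at hlen
      | cons y ys =>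
          simp only [List.zipWith_cons_cons, List.foldl_cons]
          rw [pv_stepB_lin c1 c2 x y hc1 hc2 (hb1 x (by simp)) (hb2 y (by simp))]
          exact ih ys (by simpa using hlen) (fun d hd => hb1 d (by simp [hd]))
            (fun d hd => hb2 d (by simp [hd]))
            (pvStepB c1 x) (pvStepB c2 y) (pv_stepB_lt c1 x hc1) (pv_stepB_lt c2 y hc2)

theorem pv_bits8_lt (b : Nat) : ∀ d ∈ pvBits8 b, d < 2 := by
  intro d hd
  simp only [pvBits8, List.mem_map] at hd
  obtain ⟨k, -, rfl⟩ := hd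
  have := Nat.and_le_right (n := b >>> (7 - k)) (m := 1)
  omega

theorem pv_crcByte_eq (b : Nat) : pvCrcByte b = (pvBits8 b).foldl pvStepB 0 := by
  simp [pvCrcByte, pvBits8, List.foldl_map]

-- feeding 8 zero bits into register c = feeding the bits of c into the zero register
theorem pv_p0 : ∀ c < 256, (pvBits8 0).foldl pvStepB c = (pvBits8 c).foldl pvStepB 0 := by
  set_option maxRecDepth 8192 in decide

theorem pv_main (c b : Nat) (hc : c < 256) (hb : b < 256) :
    (pvBits8 b).foldl pvStepB c = pvCrcTable.getD (c ^^^ b) 0 := by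
  have hlen : (pvBits8 c).length = (pvBits8 b).length := by simp [pvBits8]
  have hfold : (pvBits8 (c ^^^ b)).foldl pvStepB 0
      = (pvBits8 c).foldl pvStepB 0 ^^^ (pvBits8 b).foldl pvStepB 0 := by
    have h0 : (0 : Nat) ^^^ 0 = 0 := rfl
    rw [pv_bits8_xor c b, ← h0]
    exact pv_fold_lin (pvBits8 c) (pvBits8 b) hlen (pv_bits8_lt c) (pv_bits8_lt b)
      0 0 (by norm_num) (by norm_num)
  have hsplit : (pvBits8 b).foldl pvStepB c
      = (pvBits8 0).foldl pvStepB c ^^^ (pvBits8 b).foldl pvStepB 0 := by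
    have hx : (0 : Nat) ^^^ b = b := by simp
    have hcz : c ^^^ (0 : Nat) = c := by simp
    have := pv_fold_lin (pvBits8 0) (pvBits8 b) (by simp [pvBits8]) (pv_bits8_lt 0)
      (pv_bits8_lt b) c 0 hc (by norm_num)
    rw [← pv_bits8_xor 0 b, hx, hcz] at this
    exact this
  rw [pv_table_getD (c ^^^ b) (Nat.xor_lt_two_pow (n := 8) hc hb), pv_crcByte_eq, hfold, hsplit,
    pv_p0 c hc]

theorem pv_base : ∀ n < 256, (pvBinDigits n).foldl pvStepB 0 = pvCrcByte n := by
  set_option maxRecDepth 8192 in decide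

theorem pv_l1 (n : Nat) (h : 256 ≤ n) :
    pvBinDigits n = pvBinDigits (n / 256) ++ pvBits8 (n % 256) := by
  have hb : (2:Nat) ≤ 2 := le_rfl
  unfold pvBinDigits
  rw [pvDigits_step 2 n hb (by omega),
      pvDigits_step 2 (n / 2) hb (by omega),
      pvDigits_step 2 (n / 2 / 2) hb (by omega),
      pvDigits_step 2 (n / 2 / 2 / 2) hb (by omega),
      pvDigits_step 2 (n / 2 / 2 / 2 / 2) hb (by omega),
      pvDigits_step 2 (n / 2 / 2 / 2 / 2 / 2) hb (by omega),
      pvDigits_step 2 (n / 2 / 2 / 2 / 2 / 2 / 2) hb (by omega),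
      pvDigits_step 2 (n / 2 / 2 / 2 / 2 / 2 / 2 / 2) hb (by omega)]
  have hdd : n / 2 / 2 / 2 / 2 / 2 / 2 / 2 / 2 = n / 256 := by omega
  rw [hdd]
  have hbits : pvBits8 (n % 256)
      = [((n % 256) >>> 7) &&& 1, ((n % 256) >>> 6) &&& 1, ((n % 256) >>> 5) &&& 1, ((n % 256) >>> 4) &&& 1,
         ((n % 256) >>> 3) &&& 1, ((n % 256) >>> 2) &&& 1, ((n % 256) >>> 1) &&& 1, ((n % 256) >>> 0) &&& 1] := by
    simp [pvBits8, List.range_succ]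
  have e7 : ((n % 256) >>> 7) &&& 1 = n / 2 / 2 / 2 / 2 / 2 / 2 / 2 % 2 := by
    rw [Nat.shiftRight_eq_div_pow, Nat.and_one_is_mod]; omega
  have e6 : ((n % 256) >>> 6) &&& 1 = n / 2 / 2 / 2 / 2 / 2 / 2 % 2 := by
    rw [Nat.shiftRight_eq_div_pow, Nat.and_one_is_mod]; omega
  have e5 : ((n % 256) >>> 5) &&& 1 = n / 2 / 2 / 2 / 2 / 2 % 2 := by
    rw [Nat.shiftRight_eq_div_pow, Nat.and_one_is_mod]; omega
  have e4 : ((n % 256) >>> 4) &&& 1 = n / 2 / 2 / 2 / 2 % 2 := by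
    rw [Nat.shiftRight_eq_div_pow, Nat.and_one_is_mod]; omega
  have e3 : ((n % 256) >>> 3) &&& 1 = n / 2 / 2 / 2 % 2 := by
    rw [Nat.shiftRight_eq_div_pow, Nat.and_one_is_mod]; omega
  have e2 : ((n % 256) >>> 2) &&& 1 = n / 2 / 2 % 2 := by
    rw [Nat.shiftRight_eq_div_pow, Nat.and_one_is_mod]; omega
  have e1 : ((n % 256) >>> 1) &&& 1 = n / 2 % 2 := by
    rw [Nat.shiftRight_eq_div_pow, Nat.and_one_is_mod]; omega
  have e0 : ((n % 256) >>> 0) &&& 1 = n % 2 := by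
    rw [Nat.shiftRight_eq_div_pow, Nat.and_one_is_mod]; omega
  rw [hbits, e7, e6, e5, e4, e3, e2, e1, e0]
  simp [List.append_assoc]

theorem pv_key (n : Nat) :
    (pvBinDigits n).foldl pvStepB 0 = pvCrc8B (pvBytesBE n) := by
  induction n using Nat.strong_induction_on with
  | _ n ih =>
      by_cases h : n < 256
      · unfold pvCrc8B pvBytesBE
        rw [pvDigits_small 256 n h]
        simp only [List.foldl_cons, List.foldl_nil]
        rw [show (0 : Nat) ^^^ n = n by simp, pv_table_getD n h]
        exact pv_base n h
      · unfold pvCrc8B pvBytesBE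
        rw [pvDigits_step 256 n (by norm_num) (by omega),
            pv_l1 n (by omega), List.foldl_append, List.foldl_append]
        simp only [List.foldl_cons, List.foldl_nil]
        have hc : (pvBinDigits (n / 256)).foldl pvStepB 0 < 256 :=
          pv_foldB_lt _ 0 (by norm_num)
        rw [pv_main _ _ hc (Nat.mod_lt _ (by norm_num))]
        have := ih (n / 256) (Nat.div_lt_self (by omega) (by norm_num))
        unfold pvCrc8B pvBytesBE at this
        rw [this]

theorem pv_crc_eq (n : Nat) :
    pvGetCRC8 (n : Int) = ((pvCrc8B (pvBytesBE n) : Nat) : Int) := by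
  unfold pvGetCRC8
  rw [pv_binstr_eq n]
  have h0 : (⟨0, 0, 0, 0, 0, 0, 0, 0⟩ : Crc8) = pvUnpack 0 := by decide
  rw [h0]
  show pvSumCrc ((List.map Int.ofNat (pvBinDigits n)).foldl pvStepA (pvUnpack 0))
      = ((pvCrc8B (pvBytesBE n) : Nat) : Int)
  rw [pv_foldA_eq (pvBinDigits n) (pv_binDigits_lt_two n) 0 (by norm_num),
      pv_sum_unpack _ (pv_foldB_lt _ 0 (by norm_num)), pv_key n]

theorem pv_word3_eq (pin pval : Int) :
    ((0x494F : Int) <<< (17:Nat) + pval <<< (16:Nat) + pin <<< (8:Nat)) >>> (8:Nat)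
      = (0x494F : Int) <<< (9:Nat) + pval <<< (8:Nat) + pin := by
  rw [Int.shiftRight_eq_div_pow]
  simp only [Int.shiftLeft_eq]
  have : (0x494F : Int) * 2 ^ 17 + pval * 2 ^ 16 + pin * 2 ^ 8
       = ((0x494F : Int) * 2 ^ 9 + pval * 2 ^ 8 + pin) * 2 ^ 8 := by ring
  rw [this]
  push_cast
  rw [Int.mul_ediv_cancel _ (by norm_num)]

-- ===== VERDICT (by name: the statement is the Claim_ definition above) =====
theorem makeCFGWord_py_spec : Claim_equal_makeCFGWord_py := by
  intro pin pinhigh _ hpre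
  simp only [Spec_makeCFGWord_py, makeCFGWord_py, makeCFGWord_py_alt]
  rw [pv_word3_eq pin (if pinhigh then 1 else 0)]
  have hnn : 0 ≤ (0x494F : Int) <<< (9:Nat) + (if pinhigh then (1:Int) else 0) <<< (8:Nat) + pin := by
    unfold Pre_makeCFGWord_py at hpre
    simp only [Int.shiftLeft_eq]
    by_cases hp : pinhigh <;> simp only [hp, if_true] at hpre ⊢ <;> norm_num at hpre ⊢ <;> omega
  obtain ⟨N, hN⟩ : ∃ N : Nat, (0x494F : Int) <<< (9:Nat) + (if pinhigh then (1:Int) else 0) <<< (8:Nat) + pin = (N : Int) :=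
    ⟨((0x494F : Int) <<< (9:Nat) + (if pinhigh then (1:Int) else 0) <<< (8:Nat) + pin).toNat,
      (Int.toNat_of_nonneg hnn).symm⟩
  rw [hN, show ((N : Int)).toNat = N from Int.toNat_natCast N, pv_crc_eq N]
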